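-- pv_equiv track=rewrite | github.com/schedin/moshi-connect | src/ui/gui_main.py | _is_complete_cookie
-- ===== SOURCE A (Python) =====
-- def _is_complete_cookie(text: str) -> bool:
--     """Check if the text looks like a complete webvpn cookie"""
--     text = text.strip()
--
--     # Basic checks for a valid webvpn cookie
--     # Typical format: alphanumeric with @ symbols, like "14112F@584429568@7EE9@A53C0A65D1E56C27DF8233C8FDC4CB24830EAC44"
--     if len(text) < 30:  # Too short to be a complete cookie
--         return False
--
--     if len(text) > 200:  # Too long to be a typical cookie
--         return False
--
--     # Should contain mostly alphanumeric characters and @ symbols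
--     allowed_chars = set('0123456789ABCDEFabcdef@')
--     if not all(c in allowed_chars for c in text):
--         return False
--
--     # Should contain at least one @ symbol (typical webvpn cookie format)
--     if '@' not in text:
--         return False
--
--     return True
-- ===== SOURCE B (Python) =====
-- import re
--
-- _COOKIE_RE = re.compile(r'[0-9A-Fa-f@]{30,200}')
--
-- def _is_complete_cookie(text: str) -> bool:
--     """Check if the text looks like a complete webvpn cookie"""
--     text = text.strip()
--     # One automaton pass checks length 30..200 and the character class;
--     # the class admits '@', so require at least one '@' separately.
--     return bool(_COOKIE_RE.fullmatch(text)) and '@' in text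
-- ===== Notes on version B (the rewrite author's own statement) =====
-- stated objective: idiomatic
-- what changed: Replaces the early-return chain of length comparisons plus an all(...) set-membership loop by one precompiled regex fullmatch ([0-9A-Fa-f@]{30,200}) that checks the character class and both length bounds in a single automaton pass, with a separate at-sign membership check.
import Mathlib
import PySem

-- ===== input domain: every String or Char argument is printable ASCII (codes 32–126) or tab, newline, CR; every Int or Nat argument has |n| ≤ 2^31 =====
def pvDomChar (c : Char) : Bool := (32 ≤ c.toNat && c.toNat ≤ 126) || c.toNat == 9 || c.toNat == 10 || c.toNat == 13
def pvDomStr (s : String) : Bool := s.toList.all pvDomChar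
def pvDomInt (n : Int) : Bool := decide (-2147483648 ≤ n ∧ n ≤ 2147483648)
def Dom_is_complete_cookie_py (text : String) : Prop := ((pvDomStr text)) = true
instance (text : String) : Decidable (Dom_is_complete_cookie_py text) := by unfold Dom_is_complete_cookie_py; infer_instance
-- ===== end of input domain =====

-- B replaces A's early-return chain (two length tests + an all(...) set-membership loop) by one
-- precompiled regex fullmatch r'[0-9A-Fa-f@]{30,200}' plus a separate '@' check (idiomatic, same cost).

-- ===== PORT A =====
def is_complete_cookie_py (text : String) : Bool :=
  let text := PySem.Str.strip text
  if PySem.Str.len text < 30 then false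
  else if PySem.Str.len text > 200 then false
  else
    let allowed_chars : PySem.Set Char := PySem.Set.ofList "0123456789ABCDEFabcdef@".toList
    if !(text.toList.all (fun c => allowed_chars.contains c)) then false
    else if !(PySem.Str.isIn "@" text) then false
    else true

-- ===== PORT B =====
-- the regex character class [0-9A-Fa-f@]
def cookieClassChar (c : Char) : Bool :=
  c.isDigit || ('A' ≤ c && c ≤ 'F') || ('a' ≤ c && c ≤ 'f') || c == '@'

-- denotation of re.fullmatch(r'[0-9A-Fa-f@]{30,200}', t) coerced to bool:
-- every char is in the class and the length is between 30 and 200 inclusive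
def cookieFullmatch (t : List Char) : Bool :=
  (decide (30 ≤ t.length) && decide (t.length ≤ 200)) && t.all cookieClassChar

def is_complete_cookie_py_alt (text : String) : Bool :=
  let text := PySem.Str.strip text
  cookieFullmatch text.toList && PySem.Str.isIn "@" text

-- ===== PRECONDITION & SPEC =====
def Spec_is_complete_cookie_py (text : String) (out : Bool) : Prop := out = is_complete_cookie_py_alt text
instance (text : String) (out : Bool) : Decidable (Spec_is_complete_cookie_py text out) := by unfold Spec_is_complete_cookie_py; infer_instance

-- ===== CLAIM (what is proved, stated in full; the proofs are below) =====
def Claim_equal_is_complete_cookie_py : Prop := ∀ (text : String), Dom_is_complete_cookie_py text → Spec_is_complete_cookie_py text (is_complete_cookie_py text)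

-- ===== LEMMAS AND PROOFS =====

-- A's allowed-character set admits exactly the regex character class, per character
lemma allowed_eq_class (c : Char) :
    (PySem.Set.ofList "0123456789ABCDEFabcdef@".toList).contains c = cookieClassChar c := by
  have hl : "0123456789ABCDEFabcdef@".toList
      = ['0','1','2','3','4','5','6','7','8','9','A','B','C','D','E','F','a','b','c','d','e','f','@'] := rfl
  rw [Bool.eq_iff_iff, PySem.Set.contains_iff, PySem.Set.mem_ofList, hl]
  simp only [List.mem_cons, List.not_mem_nil, or_false, cookieClassChar, Char.isDigit,
    Bool.or_eq_true, Bool.and_eq_true, decide_eq_true_eq, beq_iff_eq,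
    Char.le_def, Char.ext_iff, UInt32.le_iff_toNat_le, ← UInt32.toNat_inj]
  simp only [(show ('0').val.toNat = 48 from rfl), (show ('1').val.toNat = 49 from rfl), (show ('2').val.toNat = 50 from rfl), (show ('3').val.toNat = 51 from rfl), (show ('4').val.toNat = 52 from rfl), (show ('5').val.toNat = 53 from rfl), (show ('6').val.toNat = 54 from rfl), (show ('7').val.toNat = 55 from rfl), (show ('8').val.toNat = 56 from rfl), (show ('9').val.toNat = 57 from rfl), (show ('A').val.toNat = 65 from rfl), (show ('B').val.toNat = 66 from rfl), (show ('C').val.toNat = 67 from rfl), (show ('D').val.toNat = 68 from rfl), (show ('E').val.toNat = 69 from rfl), (show ('F').val.toNat = 70 from rfl), (show ('a').val.toNat = 97 from rfl), (show ('b').val.toNat = 98 from rfl), (show ('c').val.toNat = 99 from rfl), (show ('d').val.toNat = 100 from rfl), (show ('e').val.toNat = 101 from rfl), (show ('f').val.toNat = 102 from rfl), (show ('@').val.toNat = 64 from rfl)]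
  omega

-- ===== VERDICT (by name: the statement is the Claim_ definition above) =====
theorem is_complete_cookie_py_spec : Claim_equal_is_complete_cookie_py := by
  intro text _
  unfold Spec_is_complete_cookie_py is_complete_cookie_py is_complete_cookie_py_alt cookieFullmatch
  simp only [allowed_eq_class]
  set t := PySem.Str.strip text with ht
  have hlen : PySem.Str.len t = (t.toList.length : Int) := by
    simp [PySem.Str.len_eq]
  rw [hlen]
  by_cases h1 : (30 : Int) ≤ (t.toList.length : Int)
  · by_cases h2 : ((t.toList.length : Int)) ≤ 200
    · simp only [if_neg (by omega : ¬ ((t.toList.length : Int) < 30)),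
        if_neg (by omega : ¬ ((t.toList.length : Int) > 200)),
        decide_eq_true (by exact_mod_cast h1 : 30 ≤ t.toList.length),
        decide_eq_true (by exact_mod_cast h2 : t.toList.length ≤ 200), Bool.true_and]
      by_cases h3 : t.toList.all cookieClassChar
      · simp [h3]
      · simp [h3]
    · simp only [if_neg (by omega : ¬ ((t.toList.length : Int) < 30)),
        if_pos (by omega : (t.toList.length : Int) > 200),
        decide_eq_false (by omega : ¬ (t.toList.length ≤ 200))]
      simp
  · rw [if_pos (by omega)]
    rw [decide_eq_false (by omega : ¬ (30 ≤ t.toList.length))]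
    simp
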